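-- pv_equiv track=rewrite | github.com/ariwbolton/substitution-cipher-breaker | substitution-cipher-breaker/monte_carlo_improved/ngram_parser.py | generate_bigrams
-- ===== SOURCE A (Python) =====
-- from typing import Generator, Tuple
--
-- def generate_bigrams(s: str) -> Generator[Tuple[str, str], None, None]:
--     """Generate bigrams for a string. Optimized for speed."""
--     len_s_1 = len(s) - 1
--
--     if len(s) == 0:
--         return
--
--     if s[0].isalpha():
--         yield ' ', s[0]
--
--     if len(s) > 1:
--         for i in range(len(s) - 1):
--             # normalize non-alphabetic characters to spaces
--             c1 = s[i]     if s[i].isalpha()     else ' '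
--             c2 = s[i + 1] if s[i + 1].isalpha() else ' '
--
--             if c1.isalpha() or c2.isalpha():  # skip whitespace-only bigrams
--                 yield c1, c2
--
--     if s[-1].isalpha():
--         yield s[-1], ' '
-- ===== SOURCE B (Python) =====
-- def generate_bigrams(s: str):
--     """Generate bigrams for a string: one uniform pass over a space-padded
--     normalized copy, skipping space-space pairs."""
--     normalized = ' ' + ''.join(c if c.isalpha() else ' ' for c in s) + ' '
--     for i in range(len(normalized) - 1):
--         a = normalized[i]
--         b = normalized[i + 1]
--         if a != ' ' or b != ' ':
--             yield a, b
-- ===== Notes on version B (the rewrite author's own statement) =====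
-- stated objective: simpler
-- what changed: A's three special cases (leading bigram, guarded middle loop with per-index normalization, trailing bigram) are collapsed into one uniform pass over a space-padded normalized copy of the string, skipping space-space pairs.
import Mathlib
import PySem

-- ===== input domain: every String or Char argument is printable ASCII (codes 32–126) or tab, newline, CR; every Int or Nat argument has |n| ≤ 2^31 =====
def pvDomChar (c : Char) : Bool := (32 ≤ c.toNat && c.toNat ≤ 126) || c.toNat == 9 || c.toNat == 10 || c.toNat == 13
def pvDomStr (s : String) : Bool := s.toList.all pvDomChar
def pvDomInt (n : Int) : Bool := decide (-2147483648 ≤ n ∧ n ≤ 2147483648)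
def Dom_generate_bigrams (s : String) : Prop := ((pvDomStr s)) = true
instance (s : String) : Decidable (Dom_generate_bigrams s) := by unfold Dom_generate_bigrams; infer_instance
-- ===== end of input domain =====

-- B replaces A's leading/middle/trailing special cases by one uniform pass over a
-- space-padded normalized copy of the string (objective: simpler decomposition).

-- one-character Python string from a char (shared literal-building helper)
def mkS (c : Char) : String := String.mk [c]

-- ===== PORT A =====
def generate_bigrams (s : String) : List (String × String) :=
  let cs := s.toList
  if cs.length = 0 then []
  else
    let out : List (String × String) :=
      if PySem.Chars.isalpha (PySem.List.pyGetD cs 0 ' ') then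
        [(mkS ' ', mkS (PySem.List.pyGetD cs 0 ' '))] else []
    let out :=
      if 1 < cs.length then
        (PySem.List.pyRange 0 ((cs.length : Int) - 1) 1).foldl (fun acc i =>
          let c1 := if PySem.Chars.isalpha (PySem.List.pyGetD cs i ' ') then PySem.List.pyGetD cs i ' ' else ' '
          let c2 := if PySem.Chars.isalpha (PySem.List.pyGetD cs (i + 1) ' ') then PySem.List.pyGetD cs (i + 1) ' ' else ' '
          if PySem.Chars.isalpha c1 || PySem.Chars.isalpha c2 then acc ++ [(mkS c1, mkS c2)] else acc) out
      else out
    out ++ (if PySem.Chars.isalpha (PySem.List.pyGetD cs (-1) ' ') then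
             [(mkS (PySem.List.pyGetD cs (-1) ' '), mkS ' ')] else [])

-- ===== PORT B =====
def generate_bigrams_alt (s : String) : List (String × String) :=
  let normalized : List Char :=
    ' ' :: (s.toList.map (fun c => if PySem.Chars.isalpha c then c else ' ')) ++ [' ']
  (PySem.List.pyRange 0 ((normalized.length : Int) - 1) 1).foldl (fun acc i =>
    let a := PySem.List.pyGetD normalized i ' '
    let b := PySem.List.pyGetD normalized (i + 1) ' '
    if a != ' ' || b != ' ' then acc ++ [(mkS a, mkS b)] else acc) []

-- ===== PRECONDITION & SPEC =====
def Spec_generate_bigrams (s : String) (out : List (String × String)) : Prop := out = generate_bigrams_alt s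
instance (s : String) (out : List (String × String)) : Decidable (Spec_generate_bigrams s out) := by unfold Spec_generate_bigrams; infer_instance

-- ===== CLAIM (what is proved, stated in full; the proofs are below) =====
def Claim_equal_generate_bigrams : Prop := ∀ (s : String), Dom_generate_bigrams s → Spec_generate_bigrams s (generate_bigrams s)

-- ===== LEMMAS AND PROOFS =====

-- adjacent-pair collector: AFg g [x0,…,xn] = g x0 x1 ++ g x1 x2 ++ …
def AFg (g : Char → Char → List (String × String)) : List Char → List (String × String)
  | a :: b :: t => g a b ++ AFg g (b :: t)
  | _ => []

lemma flatMap_ite {α β} (l : List α) (P : α → Bool) (F : α → β) :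
    l.flatMap (fun i => if P i then [F i] else []) = (l.filter P).map F := by
  induction l with
  | nil => simp
  | cons a t ih => by_cases h : P a <;> simp [List.flatMap_cons, h, ih]

lemma mapRangePairs (l : List Char) :
    (List.range (l.length - 1)).map (fun k => (l.getD k ' ', l.getD (k + 1) ' ')) = l.zip l.tail := by
  apply List.ext_getElem
  · simp [List.length_zip, List.length_tail]
  · intro k h1 h2
    simp only [List.length_map, List.length_range] at h1
    have hk : k < l.length := by omega
    have hk1 : k + 1 < l.length := by omega
    have hkt : k < l.tail.length := by simp [List.length_tail]; omega
    simp [List.getElem_zip, List.getElem_tail, List.getD_eq_getElem?_getD,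
      List.getElem?_eq_getElem hk, List.getElem?_eq_getElem hk1]

lemma zipFlat (g : Char → Char → List (String × String)) :
    ∀ l : List Char, (l.zip l.tail).flatMap (fun q => g q.1 q.2) = AFg g l := by
  intro l
  induction l with
  | nil => simp [AFg]
  | cons a t ih =>
    cases t with
    | nil => simp [AFg]
    | cons b t' =>
      simp only [List.tail_cons, List.zip_cons_cons, List.flatMap_cons] at ih ⊢
      rw [show AFg g (a :: b :: t') = g a b ++ AFg g (b :: t') from rfl, ih]

lemma foldl_adj (l : List Char) (acc : List (String × String))
    (p : Char → Char → Bool) (f : Char → Char → String × String) :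
    (PySem.List.pyRange 0 ((l.length : Int) - 1) 1).foldl (fun acc i =>
        if p (PySem.List.pyGetD l i ' ') (PySem.List.pyGetD l (i + 1) ' ') then
          acc ++ [f (PySem.List.pyGetD l i ' ') (PySem.List.pyGetD l (i + 1) ' ')] else acc) acc
      = acc ++ AFg (fun a b => if p a b then [f a b] else []) l := by
  rw [PySem.List.foldl_append_if
    (fun i => p (PySem.List.pyGetD l i ' ') (PySem.List.pyGetD l (i + 1) ' '))
    (fun i => f (PySem.List.pyGetD l i ' ') (PySem.List.pyGetD l (i + 1) ' '))]
  congr 1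
  rw [← flatMap_ite, ← zipFlat (fun a b => if p a b then [f a b] else []) l, ← mapRangePairs l,
    PySem.List.pyRange_one]
  rw [List.flatMap_map, List.flatMap_map]
  have hn : ((l.length : Int) - 1 - 0).toNat = l.length - 1 := by omega
  rw [hn]
  refine List.flatMap_congr (fun k hk => ?_)
  simp only [zero_add, show ((k : Int) + 1) = (((k + 1 : Nat)) : Int) by push_cast; ring,
    PySem.List.pyGetD_natCast]

-- normalization and the two emit functions (proof-side views of the loop bodies)
def normC (a : Char) : Char := if PySem.Chars.isalpha a then a else ' '

def gA (a b : Char) : List (String × String) :=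
  if PySem.Chars.isalpha (normC a) || PySem.Chars.isalpha (normC b) then
    [(mkS (normC a), mkS (normC b))] else []

def gB (a b : Char) : List (String × String) :=
  if a != ' ' || b != ' ' then [(mkS a, mkS b)] else []

def headT (l : List Char) : List (String × String) :=
  match l.head? with
  | some c => if PySem.Chars.isalpha c then [(mkS ' ', mkS c)] else []
  | none => []

def lastT (l : List Char) : List (String × String) :=
  match l.getLast? with
  | some c => if PySem.Chars.isalpha c then [(mkS c, mkS ' ')] else []
  | none => []

lemma isalpha_norm (a : Char) :
    PySem.Chars.isalpha (normC a) = PySem.Chars.isalpha a := by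
  unfold normC; by_cases h : PySem.Chars.isalpha a <;> simp [h] <;> decide

lemma norm_ne_space (a : Char) : (normC a != ' ') = PySem.Chars.isalpha a := by
  unfold normC
  by_cases h : PySem.Chars.isalpha a
  · simp [h]
    intro he; rw [he] at h; exact absurd h (by decide)
  · simp [h]

lemma alpha_ne_space (a : Char) (h : PySem.Chars.isalpha a = true) : a ≠ ' ' := by
  intro he; rw [he] at h; exact absurd h (by decide)

lemma norm_of_alpha (a : Char) (h : PySem.Chars.isalpha a = true) : normC a = a := by
  unfold normC; simp [h]

lemma gB_norm (a b : Char) : gB (normC a) (normC b) = gA a b := by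
  unfold gB gA
  rw [norm_ne_space, norm_ne_space, isalpha_norm, isalpha_norm]

lemma tailpart : ∀ (cs : List Char) (a : Char),
    AFg gB (normC a :: cs.map normC ++ [' ']) = AFg gA (a :: cs) ++ lastT (a :: cs) := by
  intro cs
  induction cs with
  | nil =>
    intro a
    show gB (normC a) ' ' ++ AFg gB [' '] = AFg gA [a] ++ lastT [a]
    by_cases h : PySem.Chars.isalpha a = true
    · simp [AFg, lastT, gB, h, norm_of_alpha a h, alpha_ne_space a h]
    · have hn : normC a = ' ' := by unfold normC; simp [h]
      simp [AFg, lastT, gB, h, hn]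
  | cons b t ih =>
    intro a
    show gB (normC a) (normC b) ++ AFg gB (normC b :: t.map normC ++ [' '])
        = (gA a b ++ AFg gA (b :: t)) ++ lastT (a :: b :: t)
    rw [ih b, gB_norm]
    have hl : lastT (a :: b :: t) = lastT (b :: t) := by
      unfold lastT; rw [List.getLast?_cons_cons]
    rw [hl, List.append_assoc]

lemma mainB (cs : List Char) :
    AFg gB (' ' :: cs.map normC ++ [' ']) = (headT cs ++ AFg gA cs) ++ lastT cs := by
  cases cs with
  | nil => simp [AFg, gB, headT, lastT]
  | cons c t =>
    show gB ' ' (normC c) ++ AFg gB (normC c :: t.map normC ++ [' ']) = _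
    rw [tailpart t c]
    have hh : gB ' ' (normC c) = headT (c :: t) := by
      unfold gB headT
      by_cases h : PySem.Chars.isalpha c = true
      · simp [h, norm_of_alpha c h, alpha_ne_space c h]
      · have hn : normC c = ' ' := by unfold normC; simp [h]
        simp [h, hn]
    rw [hh, List.append_assoc]

lemma altB (s : String) :
    generate_bigrams_alt s = (headT s.toList ++ AFg gA s.toList) ++ lastT s.toList := by
  have h1 : generate_bigrams_alt s
      = [] ++ AFg gB (' ' :: s.toList.map normC ++ [' ']) :=
    foldl_adj (' ' :: s.toList.map normC ++ [' ']) []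
      (fun a b => a != ' ' || b != ' ') (fun a b => (mkS a, mkS b))
  rw [h1, List.nil_append, mainB]

lemma portA (s : String) (c : Char) (t : List Char) (hct : s.toList = c :: t) :
    generate_bigrams s = (headT s.toList ++ AFg gA s.toList) ++ lastT s.toList := by
  have hne : s.toList.length = 0 → False := by rw [hct]; simp
  have hhead : PySem.List.pyGetD s.toList 0 ' ' = c := by
    rw [hct]; exact PySem.List.pyGetD_zero_cons c t ' '
  have hlast : PySem.List.pyGetD s.toList (-1) ' '
      = s.toList.getLast (by rw [hct]; simp) := PySem.List.pyGetD_neg_one s.toList ' ' _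
  have hH : (if PySem.Chars.isalpha (PySem.List.pyGetD s.toList 0 ' ') then
        [(mkS ' ', mkS (PySem.List.pyGetD s.toList 0 ' '))] else []) = headT s.toList := by
    rw [hhead, hct]; unfold headT; simp
  have hT : (if PySem.Chars.isalpha (PySem.List.pyGetD s.toList (-1) ' ') then
        [(mkS (PySem.List.pyGetD s.toList (-1) ' '), mkS ' ')] else []) = lastT s.toList := by
    rw [hlast]; unfold lastT
    rw [List.getLast?_eq_getLast (l := s.toList) (by rw [hct]; simp)]
  by_cases hg : 1 < s.toList.length
  · have hA : generate_bigrams s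
        = ((if PySem.Chars.isalpha (PySem.List.pyGetD s.toList 0 ' ') then
             [(mkS ' ', mkS (PySem.List.pyGetD s.toList 0 ' '))] else [])
           ++ AFg gA s.toList)
          ++ (if PySem.Chars.isalpha (PySem.List.pyGetD s.toList (-1) ' ') then
             [(mkS (PySem.List.pyGetD s.toList (-1) ' '), mkS ' ')] else []) := by
      show (if s.toList.length = 0 then [] else _) = _
      rw [if_neg hne]
      show (if 1 < s.toList.length then _ else _) ++ _ = _
      rw [if_pos hg]
      congr 1
      exact foldl_adj s.toList _
        (fun a b => PySem.Chars.isalpha (normC a) || PySem.Chars.isalpha (normC b))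
        (fun a b => (mkS (normC a), mkS (normC b)))
    rw [hA, hH, hT]
  · have ht : t = [] := by
      rw [hct] at hg; simp at hg
      cases t with | nil => rfl | cons x xs => simp at hg
    have hA : generate_bigrams s
        = (if PySem.Chars.isalpha (PySem.List.pyGetD s.toList 0 ' ') then
             [(mkS ' ', mkS (PySem.List.pyGetD s.toList 0 ' '))] else [])
          ++ (if PySem.Chars.isalpha (PySem.List.pyGetD s.toList (-1) ' ') then
             [(mkS (PySem.List.pyGetD s.toList (-1) ' '), mkS ' ')] else []) := by
      show (if s.toList.length = 0 then [] else _) = _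
      rw [if_neg hne]
      show (if 1 < s.toList.length then _ else _) ++ _ = _
      rw [if_neg hg]
    rw [hA, hH, hT]
    have : AFg gA s.toList = [] := by rw [hct, ht]; rfl
    rw [this, List.append_nil]

-- ===== VERDICT (by name: the statement is the Claim_ definition above) =====
theorem generate_bigrams_spec : Claim_equal_generate_bigrams := by
  intro s _
  unfold Spec_generate_bigrams
  cases hct : s.toList with
  | nil =>
    have hA : generate_bigrams s = [] := by
      show (if s.toList.length = 0 then [] else _) = []
      rw [if_pos (by rw [hct]; rfl)]
    rw [hA, altB, hct]
    rfl
  | cons c t => rw [portA s c t hct, altB]
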